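-- pv_equiv track=rewrite | github.com/xtreme696/Programacion_en_Python_UNSAM | Ejercicios/Clase07/random_walk.py | mas_alejada
-- ===== SOURCE A (Python) =====
-- def mas_alejada(caminatas):
--     'Devuelve la caminata que m치s difiere del eje X en su punto m치s lejano'
--     caminata = caminatas[0]
--     valor_mas_lejano = 0
--     for c in caminatas:
--         for i in c:
--             if abs(i) > valor_mas_lejano:
--                 valor_mas_lejano = abs(i)
--                 caminata = c
--     return caminata
-- ===== SOURCE B (Python) =====
-- def mas_alejada(caminatas):
--     'Devuelve la caminata que mas difiere del eje X en su punto mas lejano'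
--     m = max((abs(i) for c in caminatas for i in c), default=0)
--     if m == 0:
--         return caminatas[0]
--     return next(c for c in caminatas if m in map(abs, c))
-- ===== Notes on version B (the rewrite author's own statement) =====
-- stated objective: alternative
-- what changed: Replaced the single accumulator-selection loop by two staged passes: first reduce all walks to the global farthest magnitude m, then search for the first walk containing an element of magnitude m (A's walk is exactly that walk, since its last strict update happens at the first occurrence of m).
import Mathlib
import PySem

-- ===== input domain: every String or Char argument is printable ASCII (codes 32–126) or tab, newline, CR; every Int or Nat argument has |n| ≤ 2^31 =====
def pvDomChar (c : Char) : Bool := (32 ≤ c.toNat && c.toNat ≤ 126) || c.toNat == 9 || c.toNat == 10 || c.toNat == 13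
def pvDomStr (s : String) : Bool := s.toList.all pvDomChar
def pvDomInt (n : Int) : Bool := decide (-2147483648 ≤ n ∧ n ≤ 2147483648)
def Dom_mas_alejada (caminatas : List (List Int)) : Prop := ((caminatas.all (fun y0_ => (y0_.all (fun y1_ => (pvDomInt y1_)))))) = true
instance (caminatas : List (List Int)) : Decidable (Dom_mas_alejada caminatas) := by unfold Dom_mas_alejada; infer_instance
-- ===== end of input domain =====

-- B replaces A's accumulator-selection loop by two staged passes: reduce to the global farthest magnitude, then find the first walk attaining it (alternative decomposition, same cost).


-- ===== PORT A =====
-- literal transliteration: caminata = caminatas[0] (IndexError on [] is excluded by Pre_),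
-- then the nested loop updating (caminata, valor_mas_lejano) whenever abs(i) > valor_mas_lejano
def mas_alejada (caminatas : List (List Int)) : List Int :=
  let caminata := PySem.List.pyGetD caminatas 0 []
  let st := caminatas.foldl
      (fun st c => c.foldl (fun st i => if st.2 < |i| then (c, |i|) else st) st)
      (caminata, 0)
  st.1

-- ===== PORT B =====
-- m = max((abs(i) for c in caminatas for i in c), default=0)
-- if m == 0: return caminatas[0]    (IndexError on [] is excluded by Pre_)
-- return next(c for c in caminatas if m in map(abs, c))
def mas_alejada_alt (caminatas : List (List Int)) : List Int :=
  let m := PySem.List.maxD (caminatas.flatMap (fun c => c.map (fun i => |i|))) (fun x => x) 0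
  if m = 0 then PySem.List.pyGetD caminatas 0 []
  else (caminatas.find? (fun c => (c.map (fun i => |i|)).contains m)).getD []

-- ===== PRECONDITION & SPEC =====
-- Pre_ excludes exactly the empty outer list, on which both A and B raise IndexError
def Pre_mas_alejada (caminatas : List (List Int)) : Prop := caminatas ≠ []
instance (caminatas : List (List Int)) : Decidable (Pre_mas_alejada caminatas) := by unfold Pre_mas_alejada; infer_instance
def pvWitness_mas_alejada : List (List Int) := [[1, -3], [2]]

def Spec_mas_alejada (caminatas : List (List Int)) (out : List Int) : Prop := out = mas_alejada_alt caminatas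
instance (caminatas : List (List Int)) (out : List Int) : Decidable (Spec_mas_alejada caminatas out) := by unfold Spec_mas_alejada; infer_instance

-- ===== CLAIM (what is proved, stated in full; the proofs are below) =====
def Claim_equal_mas_alejada : Prop := ∀ (caminatas : List (List Int)), Dom_mas_alejada caminatas → Pre_mas_alejada caminatas → Spec_mas_alejada caminatas (mas_alejada caminatas)

-- ===== LEMMAS AND PROOFS =====

-- running max over the absolute values of one walk, and over a list of walks
def absMax (v : Int) (c : List Int) : Int := c.foldl (fun a i => max a |i|) v
def absMaxAll (v : Int) (t : List (List Int)) : Int := t.foldl absMax v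

lemma le_absMax (v : Int) (c : List Int) : v ≤ absMax v c :=
  (PySem.List.le_foldl_max_int c (fun i => |i|) v).1

lemma mem_le_absMax (v : Int) (c : List Int) {i : Int} (h : i ∈ c) : |i| ≤ absMax v c :=
  (PySem.List.le_foldl_max_int c (fun i => |i|) v).2 i h

lemma absMax_eq_foldl_map (v : Int) (c : List Int) :
    absMax v c = (c.map (fun i => |i|)).foldl max v := by
  simp [absMax, List.foldl_map]

lemma absMax_achieved (v : Int) (c : List Int) :
    absMax v c = v ∨ absMax v c ∈ c.map (fun i => |i|) := by
  rw [absMax_eq_foldl_map]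
  exact PySem.List.foldl_max_mem _ _

lemma le_absMaxAll (v : Int) (t : List (List Int)) : v ≤ absMaxAll v t := by
  induction t generalizing v with
  | nil => exact le_refl v
  | cons c rest ih =>
      exact le_trans (le_absMax v c) (ih (absMax v c))

lemma absMaxAll_achieved (v : Int) (t : List (List Int)) :
    absMaxAll v t = v ∨ ∃ c ∈ t, absMaxAll v t ∈ c.map (fun i => |i|) := by
  induction t generalizing v with
  | nil => exact Or.inl rfl
  | cons c rest ih =>
      have hM : absMaxAll v (c :: rest) = absMaxAll (absMax v c) rest := rfl
      rcases ih (absMax v c) with h | ⟨c', hc', hm⟩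
      · rcases absMax_achieved v c with h2 | h2
        · exact Or.inl (by rw [hM, h, h2])
        · exact Or.inr ⟨c, List.mem_cons_self, by rw [hM, h]; exact h2⟩
      · exact Or.inr ⟨c', List.mem_cons_of_mem _ hc', by rw [hM]; exact hm⟩

-- A's inner loop: the second component is the running abs-max, the first flips to c0 iff it strictly grew
lemma inner_snd (c : List Int) (c0 p : List Int) (v : Int) :
    (c.foldl (fun st i => if st.2 < |i| then (c0, |i|) else st) (p, v)).2 = absMax v c := by
  induction c generalizing p v with
  | nil => rfl
  | cons i rest ih =>
      simp only [List.foldl, absMax]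
      by_cases h : v < |i|
      · simp [h, ih, absMax, max_eq_right (le_of_lt h)]
      · simp [h, ih, absMax, max_eq_left (le_of_not_gt h)]

lemma inner_fst (c : List Int) (c0 p : List Int) (v : Int) :
    (c.foldl (fun st i => if st.2 < |i| then (c0, |i|) else st) (p, v)).1
      = if v < absMax v c then c0 else p := by
  induction c generalizing p v with
  | nil => simp [absMax]
  | cons i rest ih =>
      simp only [List.foldl, absMax]
      by_cases h : v < |i|
      · have hle : |i| ≤ absMax |i| rest :=
          (PySem.List.le_foldl_max_int rest (fun i => |i|) |i|).1
        have hlt : v < absMax (max v |i|) rest := by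
          rw [max_eq_right (le_of_lt h)]; exact lt_of_lt_of_le h hle
        simp only [absMax] at hlt
        rw [if_pos h, ih, if_pos hlt]
        split_ifs <;> rfl
      · rw [if_neg h, ih]
        have : max v |i| = v := max_eq_left (le_of_not_gt h)
        simp [absMax, this]

-- membership of the global max in a walk forces it below that walk's abs-max
lemma contains_le (m : Int) (c : List Int) (v : Int)
    (h : (c.map (fun i => |i|)).contains m = true) : m ≤ absMax v c := by
  rcases List.mem_map.mp (List.contains_iff_mem.mp h) with ⟨i, hi, rfl⟩
  exact mem_le_absMax v c hi

lemma contains_of_mem (m : Int) (c : List Int)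
    (h : m ∈ c.map (fun i => |i|)) : (c.map (fun i => |i|)).contains m = true :=
  List.contains_iff_mem.mpr h

-- A's outer fold selects the first walk containing the global abs-max (when it strictly exceeds v)
lemma outer_char (t : List (List Int)) (p : List Int) (v : Int) :
    (t.foldl (fun st c => c.foldl (fun st i => if st.2 < |i| then (c, |i|) else st) st) (p, v)).1
      = if v < absMaxAll v t
        then (t.find? (fun c => (c.map (fun i => |i|)).contains (absMaxAll v t))).getD p
        else p := by
  induction t generalizing p v with
  | nil => simp [absMaxAll]
  | cons c rest ih =>
      have hM : absMaxAll v (c :: rest) = absMaxAll (absMax v c) rest := rfl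
      have hstep :
          c.foldl (fun st i => if st.2 < |i| then (c, |i|) else st) (p, v)
            = (if v < absMax v c then c else p, absMax v c) := by
        rw [Prod.ext_iff]; exact ⟨inner_fst c c p v, inner_snd c c p v⟩
      simp only [List.foldl, hstep, hM]
      rw [ih]
      set v' := absMax v c with hv'
      set M := absMaxAll v' rest with hMdef
      have hvv' : v ≤ v' := le_absMax v c
      have hv'M : v' ≤ M := le_absMaxAll v' rest
      by_cases hlt : v' < M
      · -- the max lies strictly past c: find? skips c (c cannot contain M)
        have hvM : v < M := lt_of_le_of_lt hvv' hlt
        have hnc : (c.map (fun i => |i|)).contains M = false := by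
          rw [Bool.eq_false_iff]
          intro hc'
          have := contains_le M c v hc'
          omega
        have hfind : (c :: rest).find? (fun c => (c.map (fun i => |i|)).contains M)
            = rest.find? (fun c => (c.map (fun i => |i|)).contains M) := by
          simp only [List.find?_cons, hnc]
        have hsome : (rest.find? (fun c => (c.map (fun i => |i|)).contains M)).isSome := by
          rcases absMaxAll_achieved v' rest with h | ⟨c', hc', hm⟩
          · omega
          · exact List.find?_isSome.mpr ⟨c', hc', contains_of_mem M c' hm⟩
        rcases Option.isSome_iff_exists.mp hsome with ⟨w, hw⟩
        rw [if_pos hlt, if_pos hvM, hfind, hw]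
        split_ifs <;> simp
      · -- v' = M: the max is already reached at or before c
        have hv'eq : v' = M := le_antisymm hv'M (le_of_not_gt hlt)
        rw [if_neg hlt]
        by_cases hvlt : v < v'
        · have hvM : v < M := hv'eq ▸ hvlt
          have hach : M ∈ c.map (fun i => |i|) := by
            rcases absMax_achieved v c with h | h
            · omega
            · exact hv'eq ▸ h
          have hfind2 : (c :: rest).find? (fun c => (c.map (fun i => |i|)).contains M)
              = some c := List.find?_cons_of_pos (contains_of_mem M c hach)
          rw [if_pos hvlt, if_pos hvM, hfind2]
          rfl
        · have hveq : v = M := by omega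
          rw [if_neg hvlt, if_neg (by omega : ¬ v < M)]

-- B's first stage computes absMaxAll 0 caminatas
lemma foldl_max_flat (t : List (List Int)) (v : Int) :
    (t.flatMap (fun c => c.map (fun i => |i|))).foldl max v = absMaxAll v t := by
  induction t generalizing v with
  | nil => rfl
  | cons c rest ih =>
      simp only [List.flatMap_cons, List.foldl_append, absMaxAll, List.foldl]
      rw [ih, ← absMax_eq_foldl_map]
      rfl

lemma maxD_flat (t : List (List Int)) :
    PySem.List.maxD (t.flatMap (fun c => c.map (fun i => |i|))) (fun x => x) 0
      = absMaxAll 0 t := by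
  rcases hL : t.flatMap (fun c => c.map (fun i => |i|)) with _ | ⟨x, r⟩
  · -- empty flatten: every walk is empty, absMaxAll 0 t = 0
    have h0 : absMaxAll 0 t = 0 := by rw [← foldl_max_flat, hL]; rfl
    rw [h0, hL]
    rfl
  · have hx : 0 ≤ x := by
      have : x ∈ t.flatMap (fun c => c.map (fun i => |i|)) := by rw [hL]; exact List.mem_cons_self ..
      rcases List.mem_flatMap.mp this with ⟨c, _, hm⟩
      rcases List.mem_map.mp hm with ⟨i, _, rfl⟩
      exact abs_nonneg i
    have h1 : PySem.List.maxD (x :: r) (fun y => y) 0 = r.foldl max x := by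
      simp [PySem.List.maxD, PySem.List.max?_id_cons]
    have h2 : (x :: r).foldl max 0 = r.foldl max x := by
      simp [List.foldl, max_eq_right hx]
    rw [← foldl_max_flat, hL, h1, ← h2]

-- ===== VERDICT (by name: the statement is the Claim_ definition above) =====
theorem mas_alejada_spec : Claim_equal_mas_alejada := by
  intro caminatas _ hpre
  cases caminatas with
  | nil => exact absurd rfl hpre
  | cons h t =>
      show mas_alejada (h :: t) = mas_alejada_alt (h :: t)
      unfold mas_alejada mas_alejada_alt
      have h0 : PySem.List.pyGetD (h :: t) 0 ([] : List Int) = h := by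
        simp [PySem.List.pyGetD, PySem.List.pyGet?, PySem.List.pyIdx?]
      simp only [List.foldl, h0, maxD_flat]
      have hstep :
          h.foldl (fun st i => if st.2 < |i| then (h, |i|) else st) (h, 0)
            = (h, absMax 0 h) := by
        rw [Prod.ext_iff]
        refine ⟨?_, inner_snd h h h 0⟩
        rw [inner_fst h h h 0]; split_ifs <;> rfl
      rw [hstep, outer_char]
      set v0 := absMax 0 h with hv0
      have hv0nn : (0 : Int) ≤ v0 := le_absMax 0 h
      have hm : absMaxAll 0 (h :: t) = absMaxAll v0 t := rfl
      set M := absMaxAll v0 t with hMdef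
      have hv0M : v0 ≤ M := le_absMaxAll v0 t
      rw [hm]
      by_cases hz : M = 0
      · have : ¬ v0 < M := by omega
        rw [if_neg this, if_pos hz]
      · rw [if_neg hz]
        by_cases hlt : v0 < M
        · have hnc : (h.map (fun i => |i|)).contains M = false := by
            rw [Bool.eq_false_iff]
            intro hc'
            have := contains_le M h 0 hc'
            omega
          have hfind : (h :: t).find? (fun c => (c.map (fun i => |i|)).contains M)
              = t.find? (fun c => (c.map (fun i => |i|)).contains M) := by
            simp only [List.find?_cons, hnc]
          have hsome : (t.find? (fun c => (c.map (fun i => |i|)).contains M)).isSome := by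
            rcases absMaxAll_achieved v0 t with hh | ⟨c', hc', hmem⟩
            · omega
            · exact List.find?_isSome.mpr ⟨c', hc', contains_of_mem M c' hmem⟩
          rcases Option.isSome_iff_exists.mp hsome with ⟨w, hw⟩
          rw [if_pos hlt, hfind, hw]
          simp
        · have hv0eq : v0 = M := by omega
          have hach : M ∈ h.map (fun i => |i|) := by
            rcases absMax_achieved 0 h with hh | hh
            · rw [← hv0] at *; omega
            · exact hv0eq ▸ hh
          have hfind2 : (h :: t).find? (fun c => (c.map (fun i => |i|)).contains M)
              = some h := List.find?_cons_of_pos (contains_of_mem M h hach)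
          rw [if_neg hlt, hfind2]
          rfl
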